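-- pv_equiv track=rewrite | github.com/christianchabot/competitive | problems/firstuniqueinstream/solution.py | solve
-- ===== SOURCE A (Python) =====
-- def solve(stream):
--     ret, stack = "", []
--     for s in stream:
--         if s not in stack:
--             stack.append(s)
--         else:
--             stack.remove(s)
--         ret += stack[0]
--     return ret
-- ===== SOURCE B (Python) =====
-- def solve(stream):
--     # Lazy queue of turn-on events + parity dict: amortized O(1) per element.
--     parity = {}          # element -> event index of its latest turn-on, or -1 if currently off
--     q = []               # (event index, element) in turn-on order; stale entries skipped lazily
--     h = 0                # head pointer into q
--     out = []
--     for i, s in enumerate(stream):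
--         if parity.get(s, -1) == -1:
--             parity[s] = i
--             q.append((i, s))
--         else:
--             parity[s] = -1
--         while parity.get(q[h][1], -1) != q[h][0]:
--             h += 1
--         out.append(q[h][1])
--     return "".join(out)
-- ===== Notes on version B (the rewrite author's own statement) =====
-- stated objective: faster
-- what changed: Replaces A's per-element linear membership scan and list.remove over the stack with a parity dict plus a lazy queue of turn-on events whose stale entries are skipped by an amortized head pointer, making the whole stream O(n) instead of O(n^2).
import Mathlib
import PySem

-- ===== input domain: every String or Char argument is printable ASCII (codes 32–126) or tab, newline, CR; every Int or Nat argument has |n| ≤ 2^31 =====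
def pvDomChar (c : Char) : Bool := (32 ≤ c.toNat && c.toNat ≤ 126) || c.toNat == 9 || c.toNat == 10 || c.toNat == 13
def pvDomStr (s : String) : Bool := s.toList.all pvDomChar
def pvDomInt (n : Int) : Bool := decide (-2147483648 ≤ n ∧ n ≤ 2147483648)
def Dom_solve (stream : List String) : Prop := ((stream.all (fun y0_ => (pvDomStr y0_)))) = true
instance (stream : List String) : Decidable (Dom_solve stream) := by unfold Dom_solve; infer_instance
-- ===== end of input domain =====

-- B keeps a parity dict and a lazy queue of turn-on events instead of A's quadratic
-- membership/remove scans over a list; objective: faster (asymptotic).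
-- Both Pythons raise IndexError when every element of some prefix occurs an even
-- number of times in it (the "stack"/queue is empty); Pre_solve excludes exactly that.

-- ===== PORT A =====
-- one Python loop iteration: toggle s in stack, append stack[0] (headD "" is
-- unreachable inside Pre_solve, where Python raises IndexError)
def solveStepA (acc : String × List String) (s : String) : String × List String :=
  let stack := if !(acc.2.contains s) then acc.2 ++ [s] else acc.2.erase s
  (acc.1 ++ stack.headD "", stack)

def solve (stream : List String) : String :=
  (stream.foldl solveStepA ("", [])).1

-- ===== PORT B =====
-- Source B's inner `while` loop: advance the head pointer past stale queue entries
def advanceQ (parity : PySem.Dict String Int) : List (Int × String) → List (Int × String)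
  | [] => []
  | e :: rest => if parity.getD e.2 (-1) = e.1 then e :: rest else advanceQ parity rest

-- one iteration of Source B's for loop; state (i, parity, queue-from-head, out)
def solveStepB (acc : Int × PySem.Dict String Int × List (Int × String) × String)
    (s : String) : Int × PySem.Dict String Int × List (Int × String) × String :=
  let i := acc.1
  let pq : PySem.Dict String Int × List (Int × String) :=
    if acc.2.1.getD s (-1) = -1 then (acc.2.1.insert s i, acc.2.2.1 ++ [(i, s)])
    else (acc.2.1.insert s (-1), acc.2.2.1)
  let q' := advanceQ pq.1 pq.2
  (i + 1, pq.1, q', acc.2.2.2 ++ (q'.headD (0, "")).2)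

def solve_alt (stream : List String) : String :=
  (stream.foldl solveStepB (0, PySem.Dict.empty, [], "")).2.2.2

-- ===== PRECONDITION & SPEC =====
-- Pre_solve: every nonempty prefix has an element of odd multiplicity; on the
-- excluded inputs both Pythons raise IndexError (A at stack[0], B at q[h]).
def Pre_solve (stream : List String) : Prop :=
  ∀ k < stream.length, ∃ s ∈ stream.take (k + 1), (stream.take (k + 1)).count s % 2 = 1

instance (stream : List String) : Decidable (Pre_solve stream) := by
  unfold Pre_solve; infer_instance

def pvWitness_solve : List String := ["a", "b", "a"]

def Spec_solve (stream : List String) (out : String) : Prop := out = solve_alt stream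
instance (stream : List String) (out : String) : Decidable (Spec_solve stream out) := by unfold Spec_solve; infer_instance

-- ===== CLAIM (what is proved, stated in full; the proofs are below) =====
def Claim_equal_solve : Prop := ∀ (stream : List String), Dom_solve stream → Pre_solve stream → Spec_solve stream (solve stream)

-- ===== LEMMAS AND PROOFS =====

-- an entry of the queue is live iff it records its element's latest turn-on
def liveQ (parity : PySem.Dict String Int) (e : Int × String) : Bool :=
  parity.getD e.2 (-1) == e.1

def InvQ (stack : List String) (i : Int) (parity : PySem.Dict String Int)
    (q : List (Int × String)) : Prop :=
  (q.filter (liveQ parity)).map Prod.snd = stack ∧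
  stack.Nodup ∧
  (∀ e ∈ q, 0 ≤ e.1 ∧ e.1 < i) ∧
  (∀ s p, parity.getD s (-1) = p → p ≠ -1 → (p, s) ∈ q)

lemma advanceQ_headD (parity : PySem.Dict String Int) (q : List (Int × String)) (d : Int × String) :
    (advanceQ parity q).headD d = (q.filter (liveQ parity)).headD d := by
  induction q with
  | nil => rfl
  | cons e rest ih =>
    by_cases h : parity.getD e.2 (-1) = e.1
    · simp [advanceQ, liveQ, h]
    · rw [show advanceQ parity (e :: rest) = advanceQ parity rest from by simp [advanceQ, h]]
      rw [ih]; congr 1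
      simp [liveQ, h]

lemma advanceQ_filter (parity : PySem.Dict String Int) (q : List (Int × String)) :
    (advanceQ parity q).filter (liveQ parity) = q.filter (liveQ parity) := by
  induction q with
  | nil => rfl
  | cons e rest ih =>
    simp only [advanceQ, List.filter_cons, liveQ]
    by_cases h : parity.getD e.2 (-1) = e.1 <;> simp [h, ih, liveQ]

lemma mem_advanceQ (parity : PySem.Dict String Int) (q : List (Int × String))
    (e : Int × String) (h : e ∈ advanceQ parity q) : e ∈ q := by
  induction q with
  | nil => simp [advanceQ] at h
  | cons f rest ih =>
    simp only [advanceQ] at h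
    split at h
    · exact h
    · exact List.mem_cons_of_mem _ (ih h)

lemma map_snd_filter_ne (s : String) (q : List (Int × String)) :
    (q.filter (fun e => e.2 != s)).map Prod.snd = (q.map Prod.snd).filter (fun t => t != s) := by
  induction q with
  | nil => rfl
  | cons e rest ih => by_cases h : e.2 != s <;> simp [h, ih]

lemma headD_map_snd (q : List (Int × String)) :
    ((q.map Prod.snd).headD "") = (q.headD (0, "")).2 := by
  cases q <;> rfl

-- one loop iteration: equal output strings, and the invariant is preserved
lemma stepAB (s r : String) (stack : List String) (i : Int) (parity : PySem.Dict String Int)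
    (q : List (Int × String)) (hInv : InvQ stack i parity q) (hi : 0 ≤ i) :
    (solveStepA (r, stack) s).1 = (solveStepB (i, parity, q, r) s).2.2.2 ∧
    InvQ (solveStepA (r, stack) s).2 (i + 1) (solveStepB (i, parity, q, r) s).2.1
      (solveStepB (i, parity, q, r) s).2.2.1 := by
  obtain ⟨hmap, hnd, hbd, hpar⟩ := hInv
  by_cases hc : s ∈ stack
  · -- s is in the stack: A erases it, B marks its entry stale
    have hpne : parity.getD s (-1) ≠ -1 := by
      rw [← hmap] at hc
      obtain ⟨e, hef, he2⟩ := List.mem_map.mp hc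
      obtain ⟨heq, hlive⟩ := List.mem_filter.mp hef
      unfold liveQ at hlive
      rw [beq_iff_eq] at hlive
      have h0 : 0 ≤ e.1 := (hbd e heq).1
      rw [← he2, hlive]; omega
    have hA : solveStepA (r, stack) s = (r ++ (stack.erase s).headD "", stack.erase s) := by
      simp only [solveStepA]
      rw [if_neg (by simp [hc])]
    have hB : solveStepB (i, parity, q, r) s =
        (i + 1, parity.insert s (-1), advanceQ (parity.insert s (-1)) q,
         r ++ ((advanceQ (parity.insert s (-1)) q).headD (0, "")).2) := by
      simp only [solveStepB]
      rw [if_neg hpne]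
    have hfilt : q.filter (liveQ (parity.insert s (-1))) =
        (q.filter (liveQ parity)).filter (fun e => e.2 != s) := by
      rw [List.filter_filter]
      apply List.filter_congr
      intro e he
      unfold liveQ
      rw [PySem.Dict.getD_insert]
      by_cases h2 : e.2 = s
      · have h0 : 0 ≤ e.1 := (hbd e he).1
        simp [h2]; omega
      · simp [h2]
    have hmap' : (q.filter (liveQ (parity.insert s (-1)))).map Prod.snd = stack.erase s := by
      rw [hfilt, map_snd_filter_ne, hmap, ← hnd.erase_eq_filter]
    refine ⟨?_, ?_, ?_, ?_, ?_⟩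
    · rw [hA, hB]
      simp only
      rw [advanceQ_headD, ← hmap', headD_map_snd]
    · rw [hA, hB]
      simp only
      rw [advanceQ_filter, hmap']
    · rw [hA]; exact hnd.erase s
    · rw [hB]
      intro e he
      have := hbd e (mem_advanceQ _ _ _ he)
      omega
    · rw [hB]
      intro s' p hgd hp
      rw [PySem.Dict.getD_insert] at hgd
      by_cases h2 : s' = s
      · rw [if_pos h2] at hgd; omega
      · rw [if_neg h2] at hgd
        have hmem : (p, s') ∈ q := hpar s' p hgd hp
        have hlive : liveQ (parity.insert s (-1)) (p, s') = true := by
          unfold liveQ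
          rw [PySem.Dict.getD_insert]
          simp [h2, hgd]
        have : (p, s') ∈ (advanceQ (parity.insert s (-1)) q).filter (liveQ (parity.insert s (-1))) := by
          rw [advanceQ_filter]
          exact List.mem_filter.mpr ⟨hmem, hlive⟩
        exact (List.mem_filter.mp this).1
  · -- s is not in the stack: A appends it, B records a fresh turn-on event
    have hp0 : parity.getD s (-1) = -1 := by
      by_contra hne
      have hmem : (parity.getD s (-1), s) ∈ q := hpar s _ rfl hne
      have hlive : liveQ parity (parity.getD s (-1), s) = true := by
        unfold liveQ; simp
      exact hc (hmap ▸ List.mem_map.mpr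
        ⟨_, List.mem_filter.mpr ⟨hmem, hlive⟩, rfl⟩)
    have hA : solveStepA (r, stack) s = (r ++ (stack ++ [s]).headD "", stack ++ [s]) := by
      simp only [solveStepA]
      rw [if_pos (by simp [hc])]
    have hB : solveStepB (i, parity, q, r) s =
        (i + 1, parity.insert s i, advanceQ (parity.insert s i) (q ++ [(i, s)]),
         r ++ ((advanceQ (parity.insert s i) (q ++ [(i, s)])).headD (0, "")).2) := by
      simp only [solveStepB]
      rw [if_pos hp0]
    have hfun : ∀ e ∈ q, liveQ (parity.insert s i) e = liveQ parity e := by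
      intro e he
      unfold liveQ
      rw [PySem.Dict.getD_insert]
      by_cases h2 : e.2 = s
      · have h0 := (hbd e he).1
        have h1 := (hbd e he).2
        rw [if_pos h2, h2, hp0]
        simp; omega
      · rw [if_neg h2]
    have hfilt : (q ++ [(i, s)]).filter (liveQ (parity.insert s i)) =
        q.filter (liveQ parity) ++ [(i, s)] := by
      rw [List.filter_append, List.filter_congr hfun]
      congr 1
      have : liveQ (parity.insert s i) (i, s) = true := by
        unfold liveQ
        rw [PySem.Dict.getD_insert]
        simp
      simp [this]
    have hmap' : ((q ++ [(i, s)]).filter (liveQ (parity.insert s i))).map Prod.snd =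
        stack ++ [s] := by
      rw [hfilt, List.map_append, hmap]; rfl
    refine ⟨?_, ?_, ?_, ?_, ?_⟩
    · rw [hA, hB]
      simp only
      rw [advanceQ_headD, ← hmap', headD_map_snd]
    · rw [hA, hB]
      simp only
      rw [advanceQ_filter, hmap']
    · rw [hA]
      have hne : ∀ a ∈ stack, ¬a = s := fun a ha h => hc (h ▸ ha)
      simp only [List.nodup_append]
      exact ⟨hnd, List.nodup_singleton s, by simpa using hne⟩
    · rw [hB]
      intro e he
      have := mem_advanceQ _ _ _ he
      rcases List.mem_append.mp this with h | h
      · have := hbd e h; omega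
      · simp at h; subst h; omega
    · rw [hB]
      intro s' p hgd hp
      rw [PySem.Dict.getD_insert] at hgd
      have hkey : (p, s') ∈ (q ++ [(i, s)]).filter (liveQ (parity.insert s i)) := by
        by_cases h2 : s' = s
        · rw [if_pos h2] at hgd
          rw [hfilt, hgd, h2]
          simp
        · rw [if_neg h2] at hgd
          refine List.mem_filter.mpr ⟨List.mem_append_left _ (hpar s' p hgd hp), ?_⟩
          unfold liveQ
          rw [PySem.Dict.getD_insert, if_neg h2, hgd]
          simp
      have : (p, s') ∈ (advanceQ (parity.insert s i) (q ++ [(i, s)])).filter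
          (liveQ (parity.insert s i)) := by
        rw [advanceQ_filter]; exact hkey
      exact (List.mem_filter.mp this).1

lemma solve_loop (stream : List String) :
    ∀ (r : String) (stack : List String) (i : Int) (parity : PySem.Dict String Int)
      (q : List (Int × String)), InvQ stack i parity q → 0 ≤ i →
      (stream.foldl solveStepA (r, stack)).1 =
        (stream.foldl solveStepB (i, parity, q, r)).2.2.2 := by
  induction stream with
  | nil => intro r stack i parity q _ _; rfl
  | cons s rest ih =>
    intro r stack i parity q hInv hi
    obtain ⟨hout, hinv'⟩ := stepAB s r stack i parity q hInv hi
    simp only [List.foldl_cons]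
    have hBeq : solveStepB (i, parity, q, r) s =
        (i + 1, (solveStepB (i, parity, q, r) s).2.1,
         (solveStepB (i, parity, q, r) s).2.2.1, (solveStepA (r, stack) s).1) := by
      rw [hout]; rfl
    rw [hBeq]
    have := ih (solveStepA (r, stack) s).1 (solveStepA (r, stack) s).2 (i + 1)
      (solveStepB (i, parity, q, r) s).2.1 (solveStepB (i, parity, q, r) s).2.2.1 hinv' (by omega)
    simpa using this

-- ===== VERDICT (by name: the statement is the Claim_ definition above) =====
theorem solve_spec : Claim_equal_solve := by
  intro stream _ _
  unfold Spec_solve solve solve_alt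
  exact solve_loop stream "" [] 0 PySem.Dict.empty []
    (by refine ⟨rfl, List.nodup_nil, by simp, by intro s p h hne; exact absurd (by rw [← h]; rfl) hne⟩) le_rfl
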